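-- pv_equiv track=rewrite | github.com/miyuchina/mistletoe | mistletoe/core_tokens.py | match_link_title
-- ===== SOURCE A (Python) =====
-- whitespace = {' ', '\t', '\n', '\x0b', '\x0c', '\r'}
--
-- def match_link_title(string, offset):
--     offset = shift_whitespace(string, offset)
--     if offset == len(string):
--         return None
--     if string[offset] == ')':
--         return offset, offset, ''
--     if string[offset] == '"':
--         closing = '"'
--     elif string[offset] == "'":
--         closing = "'"
--     elif string[offset] == '(':
--         closing = ')'
--     else:
--         return None
--     escaped = False
--     for i, c in enumerate(string[offset+1:], start=offset+1):
--         if c == '\\' and not escaped: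
--             escaped = True
--         elif c == closing and not escaped:
--             return offset, i+1, string[offset+1:i]
--         elif escaped:
--             escaped = False
--     return None
--
-- def shift_whitespace(string, index):
--     for i, c in enumerate(string[index:], start=index):
--         if c not in whitespace:
--             return i
--     return len(string)
-- ===== SOURCE B (Python) =====
-- import re
--
-- whitespace = {' ', '\t', '\n', '\x0b', '\x0c', '\r'}
--
-- _title_res = {
--     opener: re.compile(r'((?:\\[\s\S]|[^' + re.escape(closing) + r'\\])*)' + re.escape(closing))
--     for opener, closing in (('"', '"'), ("'", "'"), ('(', ')'))
-- }
--
-- def match_link_title(string, offset):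
--     offset = shift_whitespace(string, offset)
--     if offset == len(string):
--         return None
--     if string[offset] == ')':
--         return offset, offset, ''
--     regex = _title_res.get(string[offset])
--     if regex is None:
--         return None
--     match = regex.match(string[offset+1:])
--     if match is None:
--         return None
--     return offset, offset + 1 + match.end(), match.group(1)
--
-- def shift_whitespace(string, index):
--     for i, c in enumerate(string[index:], start=index):
--         if c not in whitespace:
--             return i
--     return len(string)
-- ===== Notes on version B (the rewrite author's own statement) =====
-- stated objective: idiomatic
-- what changed: A's character-by-character escaped-flag state machine over string[offset+1:] is replaced by a single match of a precompiled regex ((?:\\[\s\S]|[^CLOSE\\])*)CLOSE applied at offset+1, with the delimiter dispatch turned into a compiled-pattern dict lookup.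
-- outside the precondition, e.g. on match_link_title('a', -5): A raises IndexError, B raises IndexError
import Mathlib
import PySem

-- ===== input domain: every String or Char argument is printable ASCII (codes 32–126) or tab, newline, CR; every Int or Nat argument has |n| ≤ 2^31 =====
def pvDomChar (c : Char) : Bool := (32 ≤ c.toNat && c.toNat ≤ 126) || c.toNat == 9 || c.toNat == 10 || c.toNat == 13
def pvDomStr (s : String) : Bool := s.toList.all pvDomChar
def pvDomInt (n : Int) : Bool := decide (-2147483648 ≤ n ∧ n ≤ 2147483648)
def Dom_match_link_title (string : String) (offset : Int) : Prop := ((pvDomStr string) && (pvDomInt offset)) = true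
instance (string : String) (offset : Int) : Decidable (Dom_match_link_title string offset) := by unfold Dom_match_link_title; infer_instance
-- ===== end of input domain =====

-- B replaces A's character-by-character escaped-flag loop by a single regex recognition over
-- string[offset+1:] (ported as a two-chars-at-a-time recognizer); objective: idiomatic.
-- ===== PORT A =====

-- the module constant `whitespace`
def pvWhitespace : List Char := [' ', '\t', '\n', '\x0b', '\x0c', '\r']

-- `for i, c in enumerate(string[index:], start=index): if c not in whitespace: return i` / fall through
def shiftWsLoop : List (Int × Char) → Option Int
  | [] => none
  | (i, c) :: rest => if c ∈ pvWhitespace then shiftWsLoop rest else some i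

-- helper `shift_whitespace` (shared by A and B in Python, identical in both)
def shift_whitespace (string : String) (index : Int) : Int :=
  match shiftWsLoop (PySem.List.enumerate (PySem.List.slice string.toList (some index) none) index) with
  | some i => i
  | none => PySem.Str.len string

-- the `for i, c in enumerate(string[offset+1:], start=offset+1)` loop with the `escaped` flag
def scanTitleA (string : String) (closing : Char) (offset : Int) :
    List (Int × Char) → Bool → Option (Int × Int × String)
  | [], _ => none
  | (i, c) :: rest, escaped =>
    if c == '\\' && !escaped then scanTitleA string closing offset rest true
    else if c == closing && !escaped then
      some (offset, i + 1, String.ofList (PySem.List.slice string.toList (some (offset + 1)) (some i)))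
    else if escaped then scanTitleA string closing offset rest false
    else scanTitleA string closing offset rest escaped

def match_link_title (string : String) (offset : Int) : Option (Int × Int × String) :=
  let offset := shift_whitespace string offset
  if offset = PySem.Str.len string then none
  else
    -- string[offset]: in-range under Pre_ (Python raises IndexError outside)
    let c := PySem.List.pyGetD string.toList offset ' '
    if c == ')' then some (offset, offset, "")
    else
      match (if c == '"' then some '"'
             else if c == '\'' then some '\''
             else if c == '(' then some ')'
             else none : Option Char) with
      | none => none
      | some closing =>
        scanTitleA string closing offset
          (PySem.List.enumerate (PySem.List.slice string.toList (some (offset + 1)) none) (offset + 1))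
          false

-- ===== PORT B =====

-- the dict `_title_res` (regex values represented by their closing delimiter)
def pvTitleClosings : PySem.Dict Char Char :=
  PySem.Dict.ofList [('"', '"'), ('\'', '\''), ('(', ')')]

-- hand port of `regex.match(s)` for the pattern ((?:\\[\s\S]|[^C\\])*)C : the greedy star is
-- deterministic here (backslash consumes two chars, anything except C and backslash consumes one,
-- C ends the match); returns the group-1 length p, so m.end() = p + 1 — exact for this pattern.
def reTitleMatch (closing : Char) : List Char → Nat → Option Nat
  | [], _ => none
  | c :: rest, p =>
    if c == '\\' then
      match rest with
      | [] => none
      | _ :: r2 => reTitleMatch closing r2 (p + 2)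
    else if c == closing then some p
    else reTitleMatch closing rest (p + 1)

def match_link_title_alt (string : String) (offset : Int) : Option (Int × Int × String) :=
  let offset := shift_whitespace string offset
  if offset = PySem.Str.len string then none
  else
    -- string[offset]: in-range under Pre_ (Python raises IndexError outside)
    let c := PySem.List.pyGetD string.toList offset ' '
    if c == ')' then some (offset, offset, "")
    else
      match PySem.Dict.get? pvTitleClosings c with
      | none => none
      | some closing =>
        let s := PySem.List.slice string.toList (some (offset + 1)) none
        match reTitleMatch closing s 0 with
        | none => none
        | some p => some (offset, offset + 1 + ((p : Int) + 1), String.ofList (s.take p))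

-- ===== PRECONDITION & SPEC =====

-- Pre_ excludes exactly the inputs where Python A raises IndexError: offsets so far before the
-- string start that even after whitespace-shifting (t below is the position of the string's first
-- non-whitespace character) the index offset+t stays below -len(string).
def Pre_match_link_title (string : String) (offset : Int) : Prop :=
  ∀ (t : Nat), t < string.toList.length →
    (∀ (j : Nat), j < t → string.toList[j]! ∈ pvWhitespace) →
    string.toList[t]! ∉ pvWhitespace →
    -(string.toList.length : Int) ≤ offset + t
instance (string : String) (offset : Int) : Decidable (Pre_match_link_title string offset) := by
  unfold Pre_match_link_title; infer_instance

def pvWitness_match_link_title : String × Int := ("  \"a\\\"b\" rest", 0)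

def Spec_match_link_title (string : String) (offset : Int) (out : Option (Int × Int × String)) : Prop := out = match_link_title_alt string offset
instance (string : String) (offset : Int) (out : Option (Int × Int × String)) : Decidable (Spec_match_link_title string offset out) := by unfold Spec_match_link_title; infer_instance

-- ===== CLAIM (what is proved, stated in full; the proofs are below) =====
def Claim_equal_match_link_title : Prop := ∀ (string : String) (offset : Int), Dom_match_link_title string offset → Pre_match_link_title string offset → Spec_match_link_title string offset (match_link_title string offset)

-- ===== LEMMAS AND PROOFS =====

-- bound on a successful recognizer result: the closing delimiter sits inside cs
theorem reTitleMatch_bound (closing : Char) :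
    ∀ (cs : List Char) (q p : Nat), reTitleMatch closing cs q = some p →
      q ≤ p ∧ p - q < cs.length := by
  suffices h : ∀ (n : Nat) (cs : List Char), cs.length ≤ n → ∀ q p,
      reTitleMatch closing cs q = some p → q ≤ p ∧ p - q < cs.length by
    intro cs; exact h cs.length cs le_rfl
  intro n
  induction n with
  | zero =>
    intro cs hlen q p hm
    have : cs = [] := by cases cs <;> simp_all
    subst this; simp [reTitleMatch] at hm
  | succ n ih =>
    intro cs hlen q p hm
    match cs with
    | [] => simp [reTitleMatch] at hm
    | c :: rest =>
      rw [reTitleMatch.eq_def] at hm; simp only [] at hm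
      by_cases h1 : c == '\\'
      · rw [if_pos h1] at hm
        match rest with
        | [] => simp at hm
        | c2 :: r2 =>
          have := ih r2 (by simp at hlen ⊢; omega) (q + 2) p hm
          simp; omega
      · rw [if_neg h1] at hm
        by_cases h2 : c == closing
        · rw [if_pos h2] at hm
          have : p = q := by simpa using hm.symm
          simp; omega
        · rw [if_neg h2] at hm
          have := ih rest (by simp at hlen ⊢; omega) (q + 1) p hm
          simp; omega

-- A's escaped-flag scan agrees with B's recognizer (generalized over the start position q)
theorem scan_core (string : String) (closing : Char) (r : Int) :
    ∀ (cs : List Char) (q : Nat),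
      scanTitleA string closing r (PySem.List.enumerate cs (r + 1 + q)) false =
        (reTitleMatch closing cs q).map
          (fun p => (r, r + 1 + ((p : Int) + 1),
            String.ofList (PySem.List.slice string.toList (some (r + 1)) (some (r + 1 + (p : Int)))))) := by
  suffices h : ∀ (n : Nat) (cs : List Char), cs.length ≤ n → ∀ (q : Nat),
      scanTitleA string closing r (PySem.List.enumerate cs (r + 1 + q)) false =
        (reTitleMatch closing cs q).map
          (fun p => (r, r + 1 + ((p : Int) + 1),
            String.ofList (PySem.List.slice string.toList (some (r + 1)) (some (r + 1 + (p : Int)))))) by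
    intro cs; exact h cs.length cs le_rfl
  intro n
  induction n with
  | zero =>
    intro cs hlen q
    have : cs = [] := by cases cs <;> simp_all
    subst this
    simp [PySem.List.enumerate, scanTitleA, reTitleMatch]
  | succ n ih =>
    intro cs hlen q
    match cs with
    | [] => simp [PySem.List.enumerate, scanTitleA, reTitleMatch]
    | c :: rest =>
      rw [PySem.List.enumerate_cons, scanTitleA, reTitleMatch.eq_def]
      by_cases h1 : c == '\\'
      · simp only [h1, Bool.not_false, Bool.and_true, if_true]
        match rest with
        | [] => simp [PySem.List.enumerate, scanTitleA]
        | c2 :: r2 =>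
          rw [PySem.List.enumerate_cons, scanTitleA]
          have hne1 : (c2 == '\\' && !true) = false := by simp
          have hne2 : (c2 == closing && !true) = false := by simp
          rw [hne1, hne2]
          simp only [if_false, if_true, Bool.false_eq_true]
          have harith : r + 1 + (q : Nat) + 1 + 1 = r + 1 + ((q + 2 : Nat) : Int) := by push_cast; ring
          rw [harith, ih r2 (by simp at hlen ⊢; omega) (q + 2)]
      · by_cases h2 : c == closing
        · have harith : r + 1 + (q : Nat) + 1 = r + 1 + ((q : Int) + 1) := by ring
          simp [h1, h2, harith]
        · have harith : r + 1 + (q : Nat) + 1 = r + 1 + ((q + 1 : Nat) : Int) := by push_cast; ring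
          rw [harith] at *
          simp only [h1, h2]
          simp only [Bool.and_true, Bool.not_false]
          rw [if_neg (by simp), if_neg (by simp), if_neg (by simp : ¬ (false = true)),
            ih rest (by simp at hlen ⊢; omega) (q + 1)]
          simp

-- xs[a : a+p] = xs[a:][:p] when either a ≥ 0, or -len ≤ a < 0 and p stays left of the end
theorem slice_take {α : Type} (xs : List α) (a : Int) (p : Nat)
    (h : 0 ≤ a ∨ (-(xs.length : Int) ≤ a ∧ a < 0 ∧ (p : Int) < -a)) :
    PySem.List.slice xs (some a) (some (a + p)) = (PySem.List.slice xs (some a) none).take p := by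
  simp only [PySem.List.slice, PySem.List.clampIdx]
  rcases h with h | ⟨h1, h2, h3⟩
  · have ha : ¬ a < 0 := by omega
    have hap : ¬ a + (p : Int) < 0 := by omega
    simp only [if_neg ha, if_neg hap]
    rw [List.take_take, List.take_eq_take_iff]
    have hlen : (xs.drop (min a.toNat xs.length)).length = xs.length - min a.toNat xs.length := by
      simp
    omega
  · have hxa : ¬ ((xs.length : Int) + a < 0) := by omega
    have hxap : ¬ ((xs.length : Int) + (a + p) < 0) := by omega
    have h2' : a + (p : Int) < 0 := by omega
    simp only [if_pos h2, if_pos h2', if_neg hxa, if_neg hxap]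
    rw [List.take_take, List.take_eq_take_iff]
    simp
    omega

-- the lookup in B's literal dict equals A's if/elif chain
theorem get?_pvTitleClosings (c : Char) : PySem.Dict.get? pvTitleClosings c =
    (if c == '"' then some '"' else if c == '\'' then some '\'' else if c == '(' then some ')' else none) := by
  have hd : pvTitleClosings = PySem.Dict.mk [('"', '"'), ('\'', '\''), ('(', ')')] := by decide
  have h0 : ∀ (x : Char), ((PySem.Dict.mk ([] : List (Char × Char))).get? x) = none := by
    intro x; simp [PySem.Dict.get?, List.find?]
  rw [hd]
  simp only [PySem.Dict.get?_mk_cons, h0, beq_iff_eq]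
  rcases Decidable.em ('"' = c) with h1 | h1 <;> rcases Decidable.em ('\'' = c) with h2 | h2 <;>
    rcases Decidable.em ('(' = c) with h3 | h3 <;> simp_all [eq_comm]

-- the shared opener branch: A's scan over enumerate(string[r+1:], r+1) equals B's recognizer branch
theorem main_branch (string : String) (r : Int) (c closing : Char)
    (hcr : PySem.List.pyGetD string.toList r ' ' = c)
    (hA : (if c == '"' then some '"' else if c == '\'' then some '\'' else if c == '(' then some ')' else none : Option Char) = some closing)
    (hopen : c = '"' ∨ c = '\'' ∨ c = '(') :
    scanTitleA string closing r
        (PySem.List.enumerate (PySem.List.slice string.toList (some (r + 1)) none) (r + 1)) false =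
      (match reTitleMatch closing (PySem.List.slice string.toList (some (r + 1)) none) 0 with
        | none => none
        | some p => some (r, r + 1 + ((p : Int) + 1),
            String.ofList ((PySem.List.slice string.toList (some (r + 1)) none).take p))) := by
  have hin : PySem.Raise.InRange string.toList.length r := by
    by_contra hin
    have hnone : PySem.List.pyGet? string.toList r = none := by
      rw [PySem.List.pyGet?_eq_none_iff]; exact hin
    have hd := PySem.List.pyGetD_of_none string.toList r ' ' hnone
    rw [hcr] at hd
    rcases hopen with h | h | h <;> simp_all
  have hrange : -(string.toList.length : Int) ≤ r ∧ r < string.toList.length := hin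
  have hsc := scan_core string closing r (PySem.List.slice string.toList (some (r + 1)) none) 0
  norm_num at hsc
  rw [hsc]
  cases hm : reTitleMatch closing (PySem.List.slice string.toList (some (r + 1)) none) 0 with
  | none => rfl
  | some p =>
    simp only [Option.bind]
    show some (r, r + 1 + ((p:Int) + 1), String.ofList (PySem.List.slice string.toList (some (r + 1)) (some (r + 1 + (p:Int))))) = _
    have hbound := reTitleMatch_bound closing _ 0 p hm
    have hside : 0 ≤ r + 1 ∨ (-(string.toList.length : Int) ≤ r + 1 ∧ r + 1 < 0 ∧ (p : Int) < -(r + 1)) := by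
      by_cases hpos : 0 ≤ r + 1
      · exact Or.inl hpos
      · refine Or.inr ⟨by omega, by omega, ?_⟩
        have hclamp : PySem.List.clampIdx string.toList.length (r + 1) =
            ((string.toList.length : Int) + (r + 1)).toNat := by
          simp only [PySem.List.clampIdx]
          rw [if_pos (by omega : r + 1 < 0), if_neg (by omega : ¬ ((string.toList.length : Int) + (r + 1) < 0))]
        have hcl : (PySem.List.slice string.toList (some (r + 1)) none).length =
            string.toList.length - ((string.toList.length : Int) + (r + 1)).toNat := by
          rw [PySem.List.slice_some_none, hclamp, List.length_drop]
        omega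
    rw [slice_take string.toList (r + 1) p hside]

-- ===== VERDICT (by name: the statement is the Claim_ definition above) =====
theorem match_link_title_spec : Claim_equal_match_link_title := by
  intro string offset _hdom _hpre
  unfold Spec_match_link_title match_link_title match_link_title_alt
  set r := shift_whitespace string offset with hr
  by_cases hlen : r = PySem.Str.len string
  · simp [hlen]
  · simp only [if_neg hlen]
    set c := PySem.List.pyGetD string.toList r ' ' with hc
    by_cases hp : c == ')'
    · simp [hp]
    · simp only [if_neg hp, get?_pvTitleClosings]
      cases hA : (if c == '"' then some '"' else if c == '\'' then some '\'' else if c == '(' then some ')' else none : Option Char) with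
      | none => rfl
      | some closing =>
        have hopen : c = '"' ∨ c = '\'' ∨ c = '(' := by
          by_cases h1 : c == '"'
          · exact Or.inl (by simpa using h1)
          · by_cases h2 : c == '\''
            · exact Or.inr (Or.inl (by simpa using h2))
            · by_cases h3 : c == '('
              · exact Or.inr (Or.inr (by simpa using h3))
              · simp [h1, h2, h3] at hA
        exact main_branch string r c closing hc.symm hA hopen
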